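-- pv_equiv track=rewrite | github.com/laquabe/OneNet | new_code/data_process.py | phrase_category
-- ===== SOURCE A (Python) =====
-- def phrase_category(llm_ans:str):
--     category_list = ['General reference','Culture and the arts','Geography and places','Health and fitness', 'History and events', 'Human activities', 'Mathematics and logic', 'Natural and physical sciences', 'People and self', 'Philosophy and thinking', 'Religion and belief systems', 'Society and social sciences', 'Technology and applied sciences']
--     llm_ans = llm_ans.lower()
--     hit_cat_dict = {}
--     for category in category_list:
--         category = category.lower()
--         if category in llm_ans:
--             pos = llm_ans.find(category)
--             hit_cat_dict[category] = pos
--     if len(hit_cat_dict) > 0: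
--         category, _ = sorted(hit_cat_dict.items(), key = lambda kv:(kv[1], kv[0]))[0]
--     else:
--         category = 'Any'
--     return category
-- ===== SOURCE B (Python) =====
-- def phrase_category(llm_ans: str):
--     category_list = ['General reference','Culture and the arts','Geography and places','Health and fitness', 'History and events', 'Human activities', 'Mathematics and logic', 'Natural and physical sciences', 'People and self', 'Philosophy and thinking', 'Religion and belief systems', 'Society and social sciences', 'Technology and applied sciences']
--     cats = sorted(c.lower() for c in category_list)
--     ans = llm_ans.lower()
--     for i in range(len(ans)):
--         for cat in cats:
--             if ans.startswith(cat, i):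
--                 return cat
--     return 'Any'
-- ===== Notes on version B (the rewrite author's own statement) =====
-- stated objective: alternative
-- what changed: B inverts the search: instead of computing each category's first-occurrence position and picking the minimal (pos, name) from a dict sorted at the end, it scans the lowered answer left to right and at each position tries the alphabetically pre-sorted lowered categories with startswith, returning the first match (earliest position, alphabetical tie-break) and never computing positions or building a table.
import Mathlib
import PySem

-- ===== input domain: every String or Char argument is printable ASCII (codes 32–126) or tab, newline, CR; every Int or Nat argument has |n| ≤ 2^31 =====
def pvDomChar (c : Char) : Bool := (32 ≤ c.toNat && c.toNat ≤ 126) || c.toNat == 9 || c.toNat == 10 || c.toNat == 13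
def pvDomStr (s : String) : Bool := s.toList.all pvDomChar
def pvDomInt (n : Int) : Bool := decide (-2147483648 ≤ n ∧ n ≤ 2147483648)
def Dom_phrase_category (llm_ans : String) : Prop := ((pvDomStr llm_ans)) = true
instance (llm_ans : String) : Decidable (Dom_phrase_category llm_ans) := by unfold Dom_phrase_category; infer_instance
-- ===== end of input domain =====

-- B inverts the search: it scans the lowered answer left to right and tries the alphabetically
-- pre-sorted lowered categories with startswith at each position, instead of A's per-category
-- find + dict + final sort.  Objective: alternative algorithm, no table and no positions.

-- The fixed category list of both Pythons, as a shared literal constant.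
def pvCategoryList : List String :=
  ["General reference", "Culture and the arts", "Geography and places", "Health and fitness",
   "History and events", "Human activities", "Mathematics and logic", "Natural and physical sciences",
   "People and self", "Philosophy and thinking", "Religion and belief systems",
   "Society and social sciences", "Technology and applied sciences"]

-- ===== PORT A =====
def phrase_category (llm_ans : String) : String :=
  let ans := PySem.Str.lower llm_ans
  let hit_cat_dict : PySem.Dict String Int :=
    pvCategoryList.foldl
      (fun d category =>
        let c := PySem.Str.lower category
        if PySem.Str.isIn c ans then d.insert c (PySem.Str.find ans c) else d)
      PySem.Dict.empty
  if hit_cat_dict.size > 0 then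
    match PySem.List.sorted2 hit_cat_dict.items (fun kv => kv.2) (fun kv => kv.1) with
    | kv :: _ => kv.1
    | [] => "Any"   -- unreachable: guarded by size > 0
  else "Any"

-- ===== PORT B =====
-- Source B's 'for i in range(len(ans)): for cat in cats: if ans.startswith(cat, i): return cat'.
-- The outer index loop is structural recursion on the suffix of ans (Python's
-- ans.startswith(cat, i) for 0 ≤ i ≤ len(ans) is exactly 'cat is a prefix of the i-th suffix',
-- so the port is exact on every admitted input); the inner first-match loop is List.find?.
def pvScan (cats : List String) : List Char → Option String
  | [] => none
  | c :: rest =>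
    match cats.find? (fun cat => cat.toList.isPrefixOf (c :: rest)) with
    | some cat => some cat
    | none => pvScan cats rest

def phrase_category_alt (llm_ans : String) : String :=
  let cats := PySem.List.sorted (pvCategoryList.map (fun c => PySem.Str.lower c)) (fun c => c)
  let ans := (PySem.Str.lower llm_ans).toList
  match pvScan cats ans with
  | some cat => cat
  | none => "Any"

-- ===== PRECONDITION & SPEC =====
def Spec_phrase_category (llm_ans : String) (out : String) : Prop := out = phrase_category_alt llm_ans
instance (llm_ans : String) (out : String) : Decidable (Spec_phrase_category llm_ans out) := by unfold Spec_phrase_category; infer_instance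

-- ===== CLAIM =====
def Claim_equal_phrase_category : Prop := ∀ (llm_ans : String), Dom_phrase_category llm_ans → Spec_phrase_category llm_ans (phrase_category llm_ans)

-- ===== LEMMAS AND PROOFS =====

-- Categories whose lowercase occurs in ans, in list order.
def pvHits (ans : String) : List String :=
  pvCategoryList.filter (fun c => PySem.Str.isIn (PySem.Str.lower c) ans)

-- The (lowered name, position) pairs A works from.
def pvL (ans : String) : List (String × Int) :=
  (pvHits ans).map (fun c => (PySem.Str.lower c, PySem.Str.find ans (PySem.Str.lower c)))

-- B's sorted lowered category list.
def pvCats : List String :=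
  PySem.List.sorted (pvCategoryList.map (fun c => PySem.Str.lower c)) (fun c => c)

-- A's 2-key comparator equals the strict lexicographic order on toLex (pos, name).
lemma pvBefore_eq :
    (fun (a b : String × Int) => (decide (a.2 < b.2) || (!decide (b.2 < a.2) && decide (a.1 < b.1))))
    = (fun (a b : String × Int) => decide (toLex (a.2, a.1) < toLex (b.2, b.1))) := by
  funext a b
  rcases lt_trichotomy a.2 b.2 with h | h | h
  · simp [Prod.Lex.lt_iff, h]
  · simp [Prod.Lex.lt_iff, h]
  · simp [Prod.Lex.lt_iff, h, not_lt_of_gt h, ne_of_gt h]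

lemma pvSorted2_eq (L : List (String × Int)) :
    PySem.List.sorted2 L (fun kv => kv.2) (fun kv => kv.1)
    = PySem.List.sorted L (fun kv => toLex (kv.2, kv.1)) := by
  rw [PySem.List.sorted_eq_foldl_insertBy]
  simp only [PySem.List.sorted2]
  rw [show (fun (a b : String × Int) => (decide (a.2 < b.2) || (!decide (b.2 < a.2) && decide (a.1 < b.1))))
      = (fun (a b : String × Int) => decide (toLex (a.2, a.1) < toLex (b.2, b.1))) from pvBefore_eq]
  rfl

lemma pvItems_eq (ans : String) :
    (pvCategoryList.foldl
      (fun (d : PySem.Dict String Int) category =>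
        let c := PySem.Str.lower category
        if PySem.Str.isIn c ans then d.insert c (PySem.Str.find ans c) else d)
      PySem.Dict.empty).items = pvL ans := by
  have hfold :
      (pvCategoryList.foldl
        (fun (d : PySem.Dict String Int) category =>
          let c := PySem.Str.lower category
          if PySem.Str.isIn c ans then d.insert c (PySem.Str.find ans c) else d)
        PySem.Dict.empty)
      = (pvHits ans).foldl
          (fun (d : PySem.Dict String Int) c =>
            d.insert (PySem.Str.lower c) (PySem.Str.find ans (PySem.Str.lower c)))
          PySem.Dict.empty := by
    unfold pvHits
    exact PySem.List.foldl_if_eq_foldl_filter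
      (fun c => PySem.Str.isIn (PySem.Str.lower c) ans)
      (fun (d : PySem.Dict String Int) c =>
        d.insert (PySem.Str.lower c) (PySem.Str.find ans (PySem.Str.lower c)))
      pvCategoryList PySem.Dict.empty
  rw [hfold]
  have hnodupAll : (pvCategoryList.map (fun c => PySem.Str.lower c)).Nodup := by decide
  have hsub : ((pvHits ans).map (fun c => PySem.Str.lower c)).Sublist
      (pvCategoryList.map (fun c => PySem.Str.lower c)) :=
    List.Sublist.map _ List.filter_sublist
  have hnodup : ((pvHits ans).map (fun c => PySem.Str.lower c)).Nodup :=
    hnodupAll.sublist hsub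
  have h := PySem.Dict.items_foldl_insert_fresh (pvHits ans)
      (fun c => PySem.Str.lower c)
      (fun c => PySem.Str.find ans (PySem.Str.lower c))
      PySem.Dict.empty
      (by intro a _; exact PySem.Dict.contains_empty _)
      hnodup
  rw [h]
  unfold pvL
  simp [PySem.Dict.empty]

lemma pvA_eq (s : String) :
    phrase_category s
    = (match PySem.List.sorted (pvL (PySem.Str.lower s)) (fun kv => toLex (kv.2, kv.1)) with
       | kv :: _ => kv.1
       | [] => "Any") := by
  unfold phrase_category
  simp only [PySem.Dict.size]
  rw [pvItems_eq, pvSorted2_eq]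
  cases h : pvL (PySem.Str.lower s) with
  | nil => simp [PySem.List.sorted]
  | cons kv t =>
    rw [if_pos (by simp)]

-- first match in a ≤-sorted list is minimal among matches
lemma pvFind?_min {p : String → Bool} {c : String} :
    ∀ {cats : List String}, cats.Pairwise (fun a b => a ≤ b) → cats.find? p = some c →
      ∀ c' ∈ cats, p c' = true → c ≤ c' := by
  intro cats
  induction cats with
  | nil => intro _ h; simp at h
  | cons a t ih =>
    intro hpw h c' hc' hp
    rw [List.pairwise_cons] at hpw
    by_cases ha : p a = true
    · rw [List.find?_cons_of_pos ha] at h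
      injection h with h; subst h
      rcases List.mem_cons.mp hc' with rfl | hm
      · exact le_refl _
      · exact hpw.1 _ hm
    · rw [List.find?_cons_of_neg (by simpa using ha)] at h
      rcases List.mem_cons.mp hc' with rfl | hm
      · exact absurd hp ha
      · exact ih hpw.2 h c' hm hp

lemma pvScan_none {cats : List String} (hne : ∀ cat ∈ cats, cat.toList ≠ []) :
    ∀ {l : List Char}, pvScan cats l = none →
      ∀ cat ∈ cats, ∀ j, ¬ (cat.toList <+: l.drop j) := by
  intro l
  induction l with
  | nil =>
    intro _ cat hc j hpre
    rw [List.drop_nil] at hpre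
    exact hne cat hc (List.prefix_nil.mp hpre)
  | cons c rest ih =>
    intro h cat hc j hpre
    rw [pvScan] at h
    cases hf : cats.find? (fun cat => cat.toList.isPrefixOf (c :: rest)) with
    | some x => rw [hf] at h; simp at h
    | none =>
      rw [hf] at h
      cases j with
      | zero =>
        have := List.find?_eq_none.mp hf cat hc
        rw [List.drop_zero] at hpre
        exact this (by simpa [List.isPrefixOf_iff_prefix] using hpre)
      | succ j' =>
        exact ih h cat hc j' (by simpa using hpre)

lemma pvScan_some {cats : List String} {c : String} :
    ∀ {l : List Char}, pvScan cats l = some c →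
      ∃ i, cats.find? (fun cat => cat.toList.isPrefixOf (l.drop i)) = some c ∧
        ∀ j < i, cats.find? (fun cat => cat.toList.isPrefixOf (l.drop j)) = none := by
  intro l
  induction l with
  | nil => intro h; simp [pvScan] at h
  | cons c0 rest ih =>
    intro h
    rw [pvScan] at h
    cases hf : cats.find? (fun cat => cat.toList.isPrefixOf (c0 :: rest)) with
    | some x =>
      rw [hf] at h
      injection h with h; subst h
      exact ⟨0, by simpa using hf, by omega⟩
    | none =>
      rw [hf] at h
      obtain ⟨i, h1, h2⟩ := ih h
      refine ⟨i + 1, by simpa using h1, ?_⟩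
      intro j hj
      cases j with
      | zero => simpa using hf
      | succ j' => simpa using h2 j' (by omega)

-- find points at i when sub occurs at i and nowhere earlier
lemma pvFind_eq {s sub : List Char} {i : Nat}
    (h1 : sub <+: s.drop i) (h2 : ∀ j < i, ¬ sub <+: s.drop j) :
    PySem.Chars.find s sub = (i : Int) := by
  have hin : PySem.Chars.isIn sub s = true :=
    (PySem.Chars.exists_prefix_drop_iff_isIn _ _).mp ⟨i, h1⟩
  have hnn : 0 ≤ PySem.Chars.find s sub :=
    (PySem.Chars.find_nonneg_iff _ _).mpr ((PySem.Chars.isIn_iff_infix _ _).mp hin)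
  obtain ⟨hp, hmin⟩ := PySem.Chars.find_spec hnn
  rcases lt_trichotomy (PySem.Chars.find s sub).toNat i with h | h | h
  · exact absurd hp (h2 _ h)
  · omega
  · exact absurd h1 (hmin i h)

-- ===== VERDICT =====
theorem phrase_category_spec : Claim_equal_phrase_category := by
  intro s _
  show phrase_category s = phrase_category_alt s
  have hcats : phrase_category_alt s
      = (match pvScan pvCats (PySem.Str.lower s).toList with
         | some cat => cat
         | none => "Any") := rfl
  rw [pvA_eq, hcats]
  set ans := PySem.Str.lower s with hans
  have hperm : pvCats.Perm (pvCategoryList.map (fun c => PySem.Str.lower c)) :=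
    PySem.List.sorted_perm _ _ false
  have hne : ∀ cat ∈ pvCats, cat.toList ≠ [] := fun cat hc =>
    (by decide : ∀ cat ∈ pvCategoryList.map (fun c => PySem.Str.lower c), cat.toList ≠ [])
      cat (hperm.mem_iff.mp hc)
  cases h : pvScan pvCats ans.toList with
  | none =>
    have hnone := pvScan_none hne h
    have hhits : pvHits ans = [] := by
      rw [pvHits, List.filter_eq_nil_iff]
      intro c hc
      intro hIn
      have hmem : PySem.Str.lower c ∈ pvCats :=
        hperm.mem_iff.mpr (List.mem_map_of_mem hc)
      have hinf : PySem.Chars.isIn (PySem.Str.lower c).toList ans.toList = true := by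
        rw [PySem.Chars.isIn_iff_infix]
        exact (PySem.Str.isIn_iff_infix _ _).mp hIn
      obtain ⟨j, hj⟩ := (PySem.Chars.exists_prefix_drop_iff_isIn _ _).mpr hinf
      exact hnone _ hmem j hj
    simp [pvL, hhits, PySem.List.sorted]
  | some catB =>
    obtain ⟨i, hfind, hbelow⟩ := pvScan_some h
    have hcmem : catB ∈ pvCats := List.mem_of_find?_eq_some hfind
    have hcpre : catB.toList <+: ans.toList.drop i := by
      have := List.find?_some hfind
      simpa [List.isPrefixOf_iff_prefix] using this
    have hnolow : ∀ cat ∈ pvCats, ∀ j < i, ¬ (cat.toList <+: ans.toList.drop j) := by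
      intro cat hc j hj hpre
      exact List.find?_eq_none.mp (hbelow j hj) cat hc
        (by simpa [List.isPrefixOf_iff_prefix] using hpre)
    -- catB = lower c0 for some c0 in the category list
    obtain ⟨c0, hc0mem, hc0⟩ := List.mem_map.mp (hperm.mem_iff.mp hcmem)
    -- find ans catB = i
    have hfindB : PySem.Chars.find ans.toList catB.toList = (i : Int) :=
      pvFind_eq hcpre (fun j hj => hnolow catB hcmem j hj)
    have hBin : PySem.Str.isIn catB ans = true := by
      rw [PySem.Str.isIn_iff_infix, ← PySem.Chars.isIn_iff_infix]
      exact (PySem.Chars.exists_prefix_drop_iff_isIn _ _).mp ⟨i, hcpre⟩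
    have hBmemL : (catB, (i : Int)) ∈ pvL ans := by
      rw [pvL, List.mem_map]
      refine ⟨c0, ?_, ?_⟩
      · rw [pvHits, List.mem_filter]
        exact ⟨hc0mem, by rw [hc0]; exact hBin⟩
      · rw [hc0]
        refine Prod.ext rfl ?_
        show PySem.Str.find ans catB = (i : Int)
        rw [PySem.Str.find_eq]
        exact hfindB
    -- minimality of (i, catB) wrt toLex over all entries of pvL
    have hmin : ∀ kv ∈ pvL ans, toLex ((i : Int), catB) ≤ toLex (kv.2, kv.1) := by
      intro kv hkv
      rw [pvL, List.mem_map] at hkv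
      obtain ⟨c1, hc1, hkv⟩ := hkv
      rw [pvHits, List.mem_filter] at hc1
      have hkv1 : kv.1 = PySem.Str.lower c1 := by rw [← hkv]
      have hkv2 : kv.2 = PySem.Str.find ans (PySem.Str.lower c1) := by rw [← hkv]
      have hmem1 : kv.1 ∈ pvCats := by
        rw [hkv1]; exact hperm.mem_iff.mpr (List.mem_map_of_mem hc1.1)
      have hin1 : PySem.Chars.isIn kv.1.toList ans.toList = true := by
        rw [PySem.Chars.isIn_iff_infix, hkv1]
        exact (PySem.Str.isIn_iff_infix _ _).mp hc1.2
      have hfind1 : kv.2 = PySem.Chars.find ans.toList kv.1.toList := by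
        rw [hkv2, hkv1, PySem.Str.find_eq]
      have hnn : 0 ≤ PySem.Chars.find ans.toList kv.1.toList :=
        (PySem.Chars.find_nonneg_iff _ _).mpr ((PySem.Chars.isIn_iff_infix _ _).mp hin1)
      obtain ⟨hp1, _⟩ := PySem.Chars.find_spec hnn
      have hige : i ≤ (PySem.Chars.find ans.toList kv.1.toList).toNat := by
        by_contra hlt
        exact hnolow kv.1 hmem1 _ (by omega) hp1
      rcases Nat.lt_or_ge i (PySem.Chars.find ans.toList kv.1.toList).toNat with hlt | hge
      · apply le_of_lt
        rw [Prod.Lex.lt_iff]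
        left
        have htn := Int.toNat_of_nonneg hnn
        simp only [ofLex_toLex, hfind1]
        omega
      · have heqi : (PySem.Chars.find ans.toList kv.1.toList).toNat = i := by omega
        have hp1' : kv.1.toList <+: ans.toList.drop i := by rw [← heqi]; exact hp1
        have hle : catB ≤ kv.1 :=
          pvFind?_min (PySem.List.sorted_pairwise _ _) hfind kv.1 hmem1
            (by simpa [List.isPrefixOf_iff_prefix] using hp1')
        rw [Prod.Lex.le_iff]
        right
        constructor
        · have htn := Int.toNat_of_nonneg hnn
          simp only [ofLex_toLex, hfind1]
          omega
        · exact hle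
    -- sorted head equals (catB, i)
    obtain ⟨m, tl, hm⟩ : ∃ m tl,
        PySem.List.sorted (pvL ans) (fun kv => toLex (kv.2, kv.1)) = m :: tl := by
      cases hs : PySem.List.sorted (pvL ans) (fun kv => toLex (kv.2, kv.1)) with
      | nil =>
        exfalso
        have := (PySem.List.sorted_eq_nil_iff _ _ _).mp hs
        rw [this] at hBmemL
        exact absurd hBmemL (List.not_mem_nil)
      | cons m tl => exact ⟨m, tl, rfl⟩
    rw [hm]
    have hmem_m : m ∈ pvL ans :=
      (PySem.List.sorted_perm (pvL ans) (fun kv => toLex (kv.2, kv.1)) false).subset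
        (by rw [hm]; exact List.mem_cons_self)
    have hmin_m := PySem.List.key_head_sorted_le (pvL ans) (fun kv => toLex (kv.2, kv.1)) hm
    have h1 : toLex ((i : Int), catB) ≤ toLex (m.2, m.1) := hmin m hmem_m
    have h2 : toLex (m.2, m.1) ≤ toLex ((i : Int), catB) := by
      have := hmin_m _ hBmemL
      simpa using this
    have heq : (m.2, m.1) = ((i : Int), catB) := toLex.injective (le_antisymm h2 h1)
    have := congrArg Prod.snd heq
    simpa using this
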